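-- pv_equiv track=rewrite | github.com/neoneye/simon-arc-lab | simon_arc_lab/image_raytrace_probecolor.py | probe_color_inner
-- ===== SOURCE A (Python) =====
-- def probe_color_inner(pixel_list: list[int], edge_color: int) -> list[int]:
--     """
--     Determine the color of the previous color span.
--     """
--     new_pixel_list = [edge_color] * len(pixel_list)
--     set_color = edge_color
--     for x in range(1, len(pixel_list)):
--         color_prev = pixel_list[x-1]
--         color = pixel_list[x]
--         if color_prev != color:
--             set_color = color_prev
--         new_pixel_list[x] = set_color
--     return new_pixel_list
-- ===== SOURCE B (Python) =====
-- def probe_color_inner(pixel_list: list[int], edge_color: int) -> list[int]: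
--     """
--     Determine the color of the previous color span.
--     Run-based: scan maximal runs of equal color; each run is painted with the
--     color of the run before it (edge_color for the first run).
--     """
--     out = []
--     prev = edge_color
--     n = len(pixel_list)
--     i = 0
--     while i < n:
--         j = i
--         while j < n and pixel_list[j] == pixel_list[i]:
--             j += 1
--         out.extend([prev] * (j - i))
--         prev = pixel_list[i]
--         i = j
--     return out
-- ===== Notes on version B (the rewrite author's own statement) =====
-- stated objective: alternative
-- what changed: Replaces the per-index loop that compares each pixel with its predecessor and overwrites a preallocated list with a run-based scan: split the list into maximal runs of equal color and emit each run painted with the previous run's color (edge_color for the first run).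
import Mathlib
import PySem

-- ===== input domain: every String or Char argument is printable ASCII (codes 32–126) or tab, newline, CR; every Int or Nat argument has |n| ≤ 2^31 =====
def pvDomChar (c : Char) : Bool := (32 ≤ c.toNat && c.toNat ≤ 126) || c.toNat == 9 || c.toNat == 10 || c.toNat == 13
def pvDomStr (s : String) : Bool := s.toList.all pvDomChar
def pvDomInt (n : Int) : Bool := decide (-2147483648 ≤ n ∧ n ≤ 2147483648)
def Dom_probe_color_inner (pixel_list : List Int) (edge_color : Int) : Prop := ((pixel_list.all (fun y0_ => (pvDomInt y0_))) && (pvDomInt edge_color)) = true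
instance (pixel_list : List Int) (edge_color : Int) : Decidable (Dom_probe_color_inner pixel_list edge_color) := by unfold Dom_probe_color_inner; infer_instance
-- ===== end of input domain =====

-- B replaces A's per-index overwrite loop by a run-based scan (paint each maximal
-- run with the previous run's color); alternative decomposition, same O(n) cost.


-- ===== PORT A =====
-- A's loop body: read pixel_list[x-1] and pixel_list[x], update set_color, write
-- new_pixel_list[x].  Indices x-1 and x are always in range (1 ≤ x < len), so the
-- total forms pyGetD/pySetD are exact here (the default branch is never taken).
def stepA (pixel_list : List Int) (st : List Int × Int) (x : Int) : List Int × Int :=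
  let color_prev := PySem.List.pyGetD pixel_list (x - 1) 0
  let color := PySem.List.pyGetD pixel_list x 0
  let set_color := if color_prev ≠ color then color_prev else st.2
  (PySem.List.pySetD st.1 x set_color, set_color)

-- new_pixel_list = [edge_color] * len(pixel_list); for x in range(1, len): stepA.
def probe_color_inner (pixel_list : List Int) (edge_color : Int) : List Int :=
  ((PySem.List.pyRange 1 (PySem.List.len pixel_list) 1).foldl (stepA pixel_list)
    (List.replicate pixel_list.length edge_color, edge_color)).1

-- ===== PORT B =====
-- splitRun c xs = (length of the maximal prefix of xs equal to c, the rest):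
-- port of B's inner while loop measuring the current run.
def splitRun (c : Int) : List Int → Nat × List Int
  | [] => (0, [])
  | x :: xs => if x = c then ((splitRun c xs).1 + 1, (splitRun c xs).2) else (0, x :: xs)

theorem splitRun_snd_length_le (c : Int) (xs : List Int) : (splitRun c xs).2.length ≤ xs.length := by
  induction xs with
  | nil => simp [splitRun]
  | cons x xs ih =>
    simp only [splitRun]
    split
    · exact Nat.le_succ_of_le ih
    · simp

-- B's outer loop: emit the current run painted with prev, recurse on the rest.
def altGo (prev : Int) : List Int → List Int
  | [] => []
  | x :: xs =>
    List.replicate ((splitRun x xs).1 + 1) prev ++ altGo x (splitRun x xs).2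
termination_by l => l.length
decreasing_by exact Nat.lt_succ_of_le (splitRun_snd_length_le x xs)

def probe_color_inner_alt (pixel_list : List Int) (edge_color : Int) : List Int :=
  altGo edge_color pixel_list

-- ===== PRECONDITION & SPEC =====
def Spec_probe_color_inner (pixel_list : List Int) (edge_color : Int) (out : List Int) : Prop := out = probe_color_inner_alt pixel_list edge_color
instance (pixel_list : List Int) (edge_color : Int) (out : List Int) : Decidable (Spec_probe_color_inner pixel_list edge_color out) := by unfold Spec_probe_color_inner; infer_instance

-- ===== CLAIM (what is proved, stated in full; the proofs are below) =====
def Claim_equal_probe_color_inner : Prop := ∀ (pixel_list : List Int) (edge_color : Int), Dom_probe_color_inner pixel_list edge_color → Spec_probe_color_inner pixel_list edge_color (probe_color_inner pixel_list edge_color)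

-- ===== LEMMAS AND PROOFS =====

-- Pairwise reference recursion: the outputs for the remaining pixels ys, where cur
-- is the pixel just before ys and s the current set_color.
def go (cur s : Int) : List Int → List Int
  | [] => []
  | y :: ys =>
    let s' := if cur ≠ y then cur else s
    s' :: go y s' ys

theorem take_succ_set (acc : List Int) (i : Nat) (v : Int) (h : i < acc.length) :
    (acc.set i v).take (i + 1) = acc.take i ++ [v] := by
  rw [List.take_set, List.take_add_one, List.getElem?_eq_getElem h]
  rw [List.set_append_right]
  · simp [List.length_take, Nat.min_eq_left (Nat.le_of_lt h)]
  · simp [Nat.min_eq_left (Nat.le_of_lt h)]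

-- Invariant of A's fold: starting at index i (1 ≤ i ≤ len), the fold fills
-- positions i.. with go (l[i-1]) s (drop i l) and keeps the first i entries of acc.
theorem foldA (l : List Int) (i : Nat) (acc : List Int) (s : Int)
    (hacc : acc.length = l.length) (h1 : 1 ≤ i) (h2 : i ≤ l.length) :
    ((PySem.List.pyRange (i : Int) (l.length : Int) 1).foldl (stepA l) (acc, s)).1
      = acc.take i ++ go (l.getD (i - 1) 0) s (l.drop i) := by
  induction hn : l.length - i generalizing i acc s with
  | zero =>
    have hi : i = l.length := by omega
    subst hi
    rw [PySem.List.pyRange_one_eq_nil (by omega)]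
    simp only [List.foldl_nil]
    rw [List.drop_of_length_le (le_refl _), List.take_of_length_le (le_of_eq hacc)]
    simp [go]
  | succ n ih =>
    have hi : i < l.length := by omega
    rw [PySem.List.pyRange_one_cons (by exact_mod_cast hi)]
    simp only [List.foldl_cons]
    have hstep : stepA l (acc, s) (i : Int)
        = (acc.set i (if l.getD (i-1) 0 ≠ l[i] then l.getD (i-1) 0 else s),
           if l.getD (i-1) 0 ≠ l[i] then l.getD (i-1) 0 else s) := by
      have hx1 : (i : Int) - 1 = ((i - 1 : Nat) : Int) := by omega
      simp only [stepA, hx1, PySem.List.pyGetD_natCast, PySem.List.pySetD_natCast]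
      simp [List.getElem?_eq_getElem hi]
    rw [hstep]
    have hcast : (i : Int) + 1 = ((i + 1 : Nat) : Int) := by omega
    rw [hcast, ih (i + 1) _ _ (by simpa using hacc) (by omega) (by omega) (by omega)]
    rw [take_succ_set _ _ _ (by omega)]
    rw [List.drop_eq_getElem_cons hi]
    simp only [go, Nat.add_sub_cancel]
    rw [List.getD_eq_getElem l 0 hi]
    simp [List.append_assoc]

-- go equals B's run-based recursion.
theorem go_eq_altGo (xs : List Int) : ∀ (cur prev : Int),
    go cur prev xs = List.replicate (splitRun cur xs).1 prev ++ altGo cur (splitRun cur xs).2 := by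
  induction xs with
  | nil => intro cur prev; simp [go, splitRun, altGo]
  | cons y ys ih =>
    intro cur prev
    by_cases h : y = cur
    · subst h
      simp [go, splitRun, List.replicate_succ, ih y prev]
    · have hne : cur ≠ y := fun hc => h hc.symm
      simp only [go, splitRun, if_neg h, if_pos hne, List.replicate_zero, List.nil_append]
      rw [altGo]
      simp [List.replicate_succ, ih y cur]

theorem altGo_cons (prev cur : Int) (xs : List Int) :
    altGo prev (cur :: xs) = prev :: go cur prev xs := by
  rw [altGo, go_eq_altGo, List.replicate_succ, List.cons_append]

-- ===== VERDICT (by name: the statement is the Claim_ definition above) =====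
theorem probe_color_inner_spec : Claim_equal_probe_color_inner := by
  intro l e _
  unfold Spec_probe_color_inner probe_color_inner probe_color_inner_alt
  cases l with
  | nil => simp [PySem.List.pyRange_one_eq_nil, altGo]
  | cons x xs =>
    have h := foldA (x :: xs) 1 (List.replicate (x :: xs).length e) e (by simp) le_rfl (by simp)
    simp only [Nat.cast_one] at h
    simp only [PySem.List.len_eq]
    rw [h, altGo_cons]
    simp [List.take_replicate]
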